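-- pv_equiv track=rewrite | github.com/trkpetra/ECOPY_23241 | src/weekly/weekly_test_1.py | sort_list_by_divisibility
-- ===== SOURCE A (Python) =====
-- def sort_list_by_divisibility(input_list):
--     res = {
--         "by_two": [i for i in input_list if i % 2 == 0],
--         "by_five": [i for i in input_list if i % 5 == 0],
--         "by_two_and_five": [i for i in input_list if i % 2 == 0 and i % 5 == 0],
--         "by_none": [i for i in input_list if i % 2 == 1 and i % 5 != 0 ]
--     }
--     return res
-- ===== SOURCE B (Python) =====
-- def sort_list_by_divisibility(input_list):
--     by_two, by_five, by_both, by_none = [], [], [], []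
--     for i in input_list:
--         e2 = i % 2 == 0
--         e5 = i % 5 == 0
--         if e2:
--             by_two.append(i)
--         if e5:
--             by_five.append(i)
--         if e2 and e5:
--             by_both.append(i)
--         if not e2 and not e5:
--             by_none.append(i)
--     return {"by_two": by_two, "by_five": by_five,
--             "by_two_and_five": by_both, "by_none": by_none}
-- ===== Notes on version B (the rewrite author's own statement) =====
-- stated objective: alternative
-- what changed: Replaces four independent list-comprehension scans of input_list with a single pass maintaining four accumulator lists.
import Mathlib
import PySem

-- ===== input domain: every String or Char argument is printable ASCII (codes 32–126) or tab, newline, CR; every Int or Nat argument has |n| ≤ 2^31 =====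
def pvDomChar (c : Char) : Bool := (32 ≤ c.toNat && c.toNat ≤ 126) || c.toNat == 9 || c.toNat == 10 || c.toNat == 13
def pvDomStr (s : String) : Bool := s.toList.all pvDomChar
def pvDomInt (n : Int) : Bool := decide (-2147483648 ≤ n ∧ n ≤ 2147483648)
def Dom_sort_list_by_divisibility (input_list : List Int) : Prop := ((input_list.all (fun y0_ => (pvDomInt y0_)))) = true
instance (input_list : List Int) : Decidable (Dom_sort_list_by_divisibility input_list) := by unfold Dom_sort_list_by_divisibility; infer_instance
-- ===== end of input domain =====

-- B replaces A's four independent comprehension scans with one pass feeding four accumulators (alternative decomposition, same result).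

-- ===== PORT A =====
-- four comprehensions, each a full filter pass over input_list
def sort_list_by_divisibility (input_list : List Int) : List (String × List Int) :=
  [ ("by_two", input_list.filter (fun i => PySem.Int.mod i 2 == 0)),
    ("by_five", input_list.filter (fun i => PySem.Int.mod i 5 == 0)),
    ("by_two_and_five", input_list.filter (fun i => PySem.Int.mod i 2 == 0 && PySem.Int.mod i 5 == 0)),
    ("by_none", input_list.filter (fun i => PySem.Int.mod i 2 == 1 && PySem.Int.mod i 5 != 0)) ]

-- ===== PORT B =====
-- one fold over input_list carrying the four accumulator lists
def pvStep (acc : List Int × List Int × List Int × List Int) (i : Int) :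
    List Int × List Int × List Int × List Int :=
  let e2 := PySem.Int.mod i 2 == 0
  let e5 := PySem.Int.mod i 5 == 0
  let t := if e2 then acc.1 ++ [i] else acc.1
  let f := if e5 then acc.2.1 ++ [i] else acc.2.1
  let b := if e2 && e5 then acc.2.2.1 ++ [i] else acc.2.2.1
  let n := if !e2 && !e5 then acc.2.2.2 ++ [i] else acc.2.2.2
  (t, f, b, n)

def sort_list_by_divisibility_alt (input_list : List Int) : List (String × List Int) :=
  let r := input_list.foldl pvStep ([], [], [], [])
  [ ("by_two", r.1), ("by_five", r.2.1), ("by_two_and_five", r.2.2.1), ("by_none", r.2.2.2) ]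

-- ===== PRECONDITION & SPEC =====
def Spec_sort_list_by_divisibility (input_list : List Int) (out : List (String × List Int)) : Prop := out = sort_list_by_divisibility_alt input_list
instance (input_list : List Int) (out : List (String × List Int)) : Decidable (Spec_sort_list_by_divisibility input_list out) := by unfold Spec_sort_list_by_divisibility; infer_instance

-- ===== CLAIM (what is proved, stated in full; the proofs are below) =====
def Claim_equal_sort_list_by_divisibility : Prop := ∀ (input_list : List Int), Dom_sort_list_by_divisibility input_list → Spec_sort_list_by_divisibility input_list (sort_list_by_divisibility input_list)

-- ===== LEMMAS AND PROOFS =====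

theorem pvFold_char (xs : List Int) (t f b n : List Int) :
    xs.foldl pvStep (t, f, b, n) =
      ( t ++ xs.filter (fun i => PySem.Int.mod i 2 == 0),
        f ++ xs.filter (fun i => PySem.Int.mod i 5 == 0),
        b ++ xs.filter (fun i => PySem.Int.mod i 2 == 0 && PySem.Int.mod i 5 == 0),
        n ++ xs.filter (fun i => PySem.Int.mod i 2 == 1 && PySem.Int.mod i 5 != 0) ) := by
  induction xs generalizing t f b n with
  | nil => simp
  | cons x xs ih =>
    simp only [List.foldl_cons, List.filter_cons, pvStep]
    rw [ih]
    by_cases hd2 : (2:Int) ∣ x <;> by_cases hd5 : (5:Int) ∣ x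
    · simp [hd2, hd5]
    · simp [hd2, hd5]
    · have h1 : x % 2 = 1 := by omega
      simp [hd5, h1]
    · have h1 : x % 2 = 1 := by omega
      simp [hd5, h1]

theorem sort_list_by_divisibility_spec : Claim_equal_sort_list_by_divisibility := by
  intro xs _
  unfold Spec_sort_list_by_divisibility sort_list_by_divisibility sort_list_by_divisibility_alt
  simp only [pvFold_char, List.nil_append]

-- ===== VERDICT (by name: the statement is the Claim_ definition above) =====
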